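-- pv_equiv track=rewrite | github.com/subh-karma/GFG-POTD | 13Aug25.py | minSoldiers
-- ===== SOURCE A (Python) =====
-- def minSoldiers(arr, k):
--     # code here
--     rem = []
--     cnt=0
--     n = -(-len(arr)//2)
--
--     for i in arr:
--         if i%k ==0:
--             cnt+=1
--         else:
--             rem.append(k-(i%k))
--     if cnt>=n:
--         return 0
--     rem.sort()
--     res=0
--     for j in rem:
--         res += j
--         cnt+=1
--         if cnt>=n:
--             return res
--     return -1
-- ===== SOURCE B (Python) =====
-- def minSoldiers(arr, k):
--     need = -(-len(arr) // 2) - sum(1 for i in arr if i % k == 0)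
--     if need <= 0:
--         return 0
--     costs = [k - i % k for i in arr if i % k != 0]
--     return _sum_smallest(costs, need)
--
--
-- def _sum_smallest(xs, m):
--     # quickselect-style partial selection: sum of the m smallest elements of xs
--     if m >= len(xs):
--         return sum(xs)
--     p = xs[len(xs) // 2]
--     lo = [x for x in xs if x < p]
--     hi = [x for x in xs if x > p]
--     if m <= len(lo):
--         return _sum_smallest(lo, m)
--     neq = len(xs) - len(hi)  # elements <= p
--     if m <= neq:
--         return sum(lo) + p * (m - len(lo))
--     return sum(xs) - sum(hi) + _sum_smallest(hi, m - neq)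
-- ===== Notes on version B (the rewrite author's own statement) =====
-- stated objective: alternative
-- what changed: B replaces A's full sort of the remainder-costs plus early-exit accumulation loop by a quickselect-style recursive partial selection (_sum_smallest) that partitions around a pivot and only recurses into the side containing the m-th smallest cost, computing need = majority - divisible-count up front.
import Mathlib
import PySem

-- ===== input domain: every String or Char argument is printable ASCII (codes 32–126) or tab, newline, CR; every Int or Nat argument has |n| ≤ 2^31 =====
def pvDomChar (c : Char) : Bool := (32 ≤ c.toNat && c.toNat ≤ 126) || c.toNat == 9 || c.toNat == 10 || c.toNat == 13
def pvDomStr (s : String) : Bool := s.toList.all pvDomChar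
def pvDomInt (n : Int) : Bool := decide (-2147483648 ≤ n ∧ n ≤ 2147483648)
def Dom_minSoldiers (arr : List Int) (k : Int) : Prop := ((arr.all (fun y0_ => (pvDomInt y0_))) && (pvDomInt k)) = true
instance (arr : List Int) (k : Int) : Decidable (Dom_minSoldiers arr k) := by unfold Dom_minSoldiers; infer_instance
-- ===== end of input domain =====

-- B replaces A's full sort + early-exit accumulation by a quickselect-style recursive
-- partial selection of the `need` smallest remainder-costs (alternative algorithm).

-- ===== PORT A =====
-- A's second for-loop (early return res once cnt >= n; -1 after the loop)
def minSoldiersLoop (l : List Int) (res cnt n : Int) : Int :=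
  match l with
  | [] => -1
  | j :: t =>
    if cnt + 1 ≥ n then res + j else minSoldiersLoop t (res + j) (cnt + 1) n

def minSoldiers (arr : List Int) (k : Int) : Int :=
  -- first for-loop: build rem and cnt
  let s := arr.foldl (fun (s : List Int × Int) i =>
    if PySem.Int.mod i k == 0 then (s.1, s.2 + 1)
    else (s.1 ++ [k - PySem.Int.mod i k], s.2)) ([], 0)
  let rem := s.1
  let cnt := s.2
  let n : Int := -(PySem.Int.floordiv (-(arr.length : Int)) 2)
  if cnt ≥ n then 0
  else minSoldiersLoop (PySem.List.sorted rem (fun x => x) false) 0 cnt n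

-- ===== PORT B =====
-- p = xs[len(xs)//2]  (getD only for totality; the index is in range whenever this is reached)
def pvPivot (xs : List Int) : Int := xs.getD (xs.length / 2) 0
-- lo = [x for x in xs if x < p]
def pvLess (xs : List Int) (p : Int) : List Int := xs.filter (fun x => decide (x < p))
-- hi = [x for x in xs if x > p]
def pvGreater (xs : List Int) (p : Int) : List Int := xs.filter (fun x => decide (p < x))

-- the three facts the port's termination proof cites, so they stay above it
theorem pvPivot_mem (xs : List Int) (h : xs ≠ []) : pvPivot xs ∈ xs := by
  have hl : xs.length / 2 < xs.length :=
    Nat.div_lt_self (List.length_pos_of_ne_nil h) (by norm_num)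
  unfold pvPivot
  rw [List.getD_eq_getElem _ _ hl]
  exact List.getElem_mem hl

theorem pvLess_length_lt (xs : List Int) (h : xs ≠ []) : (pvLess xs (pvPivot xs)).length < xs.length :=
  List.length_filter_lt_length_iff_exists.mpr ⟨_, pvPivot_mem xs h, by simp⟩

theorem pvGreater_length_lt (xs : List Int) (h : xs ≠ []) : (pvGreater xs (pvPivot xs)).length < xs.length :=
  List.length_filter_lt_length_iff_exists.mpr ⟨_, pvPivot_mem xs h, by simp⟩

-- _sum_smallest: quickselect-style sum of the m smallest elements of xs
def sumSmallest (xs : List Int) (m : Int) : Int :=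
  if m ≥ (xs.length : Int) then xs.sum
  else if hnil : xs = [] then 0
    -- unreachable from minSoldiers_alt (which calls with 0 ≤ m ≤ len); Python raises IndexError here
  else if m ≤ ((pvLess xs (pvPivot xs)).length : Int) then
    sumSmallest (pvLess xs (pvPivot xs)) m
  else if m ≤ (xs.length : Int) - ((pvGreater xs (pvPivot xs)).length : Int) then
    (pvLess xs (pvPivot xs)).sum + (pvPivot xs) * (m - ((pvLess xs (pvPivot xs)).length : Int))
  else
    xs.sum - (pvGreater xs (pvPivot xs)).sum
      + sumSmallest (pvGreater xs (pvPivot xs))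
          (m - ((xs.length : Int) - ((pvGreater xs (pvPivot xs)).length : Int)))
termination_by xs.length
decreasing_by
  · exact pvLess_length_lt xs hnil
  · exact pvGreater_length_lt xs hnil

def minSoldiers_alt (arr : List Int) (k : Int) : Int :=
  let need : Int := -(PySem.Int.floordiv (-(arr.length : Int)) 2)
      - ((arr.filter (fun i => PySem.Int.mod i k == 0)).length : Int)
  if need ≤ 0 then 0
  else
    let costs := (arr.filter (fun i => !(PySem.Int.mod i k == 0))).map (fun i => k - PySem.Int.mod i k)
    sumSmallest costs need

-- ===== PRECONDITION & SPEC =====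
-- Pre_ excludes exactly k = 0, on which Python's `i % k` raises ZeroDivisionError.
def Pre_minSoldiers (arr : List Int) (k : Int) : Prop := k ≠ 0
instance (arr : List Int) (k : Int) : Decidable (Pre_minSoldiers arr k) := by unfold Pre_minSoldiers; infer_instance
def pvWitness_minSoldiers : List Int × Int := ([1, 2, 3], 2)

def Spec_minSoldiers (arr : List Int) (k : Int) (out : Int) : Prop := out = minSoldiers_alt arr k
instance (arr : List Int) (k : Int) (out : Int) : Decidable (Spec_minSoldiers arr k out) := by unfold Spec_minSoldiers; infer_instance

-- ===== CLAIM (what is proved, stated in full; the proofs are below) =====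
def Claim_equal_minSoldiers : Prop := ∀ (arr : List Int) (k : Int), Dom_minSoldiers arr k → Pre_minSoldiers arr k → Spec_minSoldiers arr k (minSoldiers arr k)

-- ===== LEMMAS AND PROOFS =====

-- A's first loop computes (costs list, divisible count)
theorem pvFoldA (k : Int) (arr : List Int) : ∀ (acc : List Int × Int),
    arr.foldl (fun (s : List Int × Int) i =>
      if PySem.Int.mod i k == 0 then (s.1, s.2 + 1)
      else (s.1 ++ [k - PySem.Int.mod i k], s.2)) acc
    = (acc.1 ++ (arr.filter (fun i => !(PySem.Int.mod i k == 0))).map (fun i => k - PySem.Int.mod i k),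
       acc.2 + ((arr.filter (fun i => PySem.Int.mod i k == 0)).length : Int)) := by
  induction arr with
  | nil => intro acc; simp
  | cons i t ih =>
    intro acc
    simp only [List.foldl_cons]
    by_cases h : (PySem.Int.mod i k == 0) = true
    · rw [if_pos h, ih]
      refine Prod.ext ?_ ?_
      · simp [h]
      · simp [h]
        ring
    · rw [if_neg h, ih]
      refine Prod.ext ?_ ?_
      · simp [h, List.append_assoc]
      · simp [h]

theorem pvTakeAppend (l₁ l₂ : List Int) : ∀ (n : Nat), (l₁ ++ l₂).take n = l₁.take n ++ l₂.take (n - l₁.length) := by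
  induction l₁ with
  | nil => intro n; simp
  | cons a t ih =>
    intro n
    cases n with
    | zero => simp
    | succ n => simp [List.take_succ_cons, ih]

theorem pvConstSum (p : Int) : ∀ (l : List Int), (∀ b ∈ l, b = p) → l.sum = (l.length : Int) * p := by
  intro l
  induction l with
  | nil => simp
  | cons a t ih =>
    intro h
    have ha : a = p := h a (by simp)
    have ht := ih (fun b hb => h b (by simp [hb]))
    simp [ha, ht]
    ring

theorem pvConstPairwise (p : Int) : ∀ (l : List Int), (∀ b ∈ l, b = p) → l.Pairwise (· ≤ ·) := by
  intro l
  induction l with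
  | nil => simp
  | cons a t ih =>
    intro h
    refine List.Pairwise.cons ?_ (ih (fun b hb => h b (by simp [hb])))
    intro b hb
    rw [h a (by simp), h b (by simp [hb])]

-- the three-way pivot partition is a permutation of the list
theorem pvPartition3 (xs : List Int) (p : Int) :
    ((pvLess xs p) ++ (xs.filter (fun x => decide (x = p))) ++ (pvGreater xs p)).Perm xs := by
  have h1 := List.filter_append_perm (fun x => decide (x < p)) xs
  have h2 := List.filter_append_perm (fun x => decide (x = p))
    (xs.filter (fun x => !decide (x < p)))
  rw [List.filter_filter, List.filter_filter] at h2
  have he : xs.filter (fun a => decide (a = p) && !decide (a < p))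
      = xs.filter (fun x => decide (x = p)) := by
    apply List.filter_congr
    intro x _
    by_cases hx : x = p <;> simp [hx]
  have hg : xs.filter (fun a => !decide (a = p) && !decide (a < p))
      = pvGreater xs p := by
    apply List.filter_congr
    intro x _
    by_cases hx1 : x < p <;> by_cases hx2 : x = p <;>
      simp [hx1, hx2] <;> omega
  rw [he, hg] at h2
  rw [List.append_assoc]
  exact (List.Perm.append_left _ h2).trans h1

-- sorting splits along the pivot
theorem pvSortedDecomp (xs : List Int) (p : Int) :
    PySem.List.sorted xs (fun x => x) false
      = PySem.List.sorted (pvLess xs p) (fun x => x) false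
        ++ (xs.filter (fun x => decide (x = p)))
        ++ PySem.List.sorted (pvGreater xs p) (fun x => x) false := by
  apply PySem.List.sorted_id_eq_of_perm_of_pairwise
  · refine List.Perm.trans ?_ (pvPartition3 xs p)
    exact ((PySem.List.sorted_perm _ _ _).append
      (List.Perm.refl _)).append (PySem.List.sorted_perm _ _ _)
  · rw [List.append_assoc, List.pairwise_append, List.pairwise_append]
    refine ⟨?_, ⟨?_, ?_, ?_⟩, ?_⟩
    · simpa using PySem.List.sorted_pairwise (xs := pvLess xs p) (key := fun x => x)
    · apply pvConstPairwise p
      intro b hb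
      simpa using (List.mem_filter.mp hb).2
    · simpa using PySem.List.sorted_pairwise (xs := pvGreater xs p) (key := fun x => x)
    · intro a ha b hb
      have ha' : a = p := by simpa using (List.mem_filter.mp ha).2
      have hb' : b ∈ pvGreater xs p := (PySem.List.mem_sorted _ _ _ _).mp hb
      have hb'' : p < b := by simpa using (List.mem_filter.mp hb').2
      omega
    · intro a ha b hb
      have ha2 : a ∈ pvLess xs p := (PySem.List.mem_sorted _ _ _ _).mp ha
      have ha' : a < p := by simpa using (List.mem_filter.mp ha2).2
      rcases List.mem_append.mp hb with hb | hb
      · have hb' : b = p := by simpa using (List.mem_filter.mp hb).2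
        omega
      · have hb2 : b ∈ pvGreater xs p := (PySem.List.mem_sorted _ _ _ _).mp hb
        have hb' : p < b := by simpa using (List.mem_filter.mp hb2).2
        omega

-- the quickselect helper computes the sum of the m smallest elements
theorem pvSumSmallest_eq : ∀ (N : Nat) (xs : List Int) (m : Int), xs.length ≤ N →
    0 ≤ m → m ≤ (xs.length : Int) →
    sumSmallest xs m = ((PySem.List.sorted xs (fun x => x) false).take m.toNat).sum := by
  intro N
  induction N with
  | zero =>
    intro xs m hN h0 hle
    have hxs : xs = [] := List.eq_nil_of_length_eq_zero (Nat.le_zero.mp hN)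
    subst hxs
    have hm : m = 0 := by simp at hle; omega
    subst hm
    rw [sumSmallest]
    simp
  | succ N ih =>
    intro xs m hN h0 hle
    by_cases hge : m ≥ (xs.length : Int)
    · rw [sumSmallest, if_pos hge]
      have htk : (PySem.List.sorted xs (fun x => x) false).length ≤ m.toNat := by
        rw [PySem.List.length_sorted]; omega
      rw [List.take_of_length_le htk]
      exact ((PySem.List.sorted_perm _ _ _).sum_eq).symm
    · have hlt : m < (xs.length : Int) := lt_of_not_ge hge
      have hnil : xs ≠ [] := by
        intro h; subst h; simp at hlt; omega
      have hplen : (pvLess xs (pvPivot xs)).length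
          + (xs.filter (fun x => decide (x = pvPivot xs))).length
          + (pvGreater xs (pvPivot xs)).length = xs.length := by
        have hp3 := (pvPartition3 xs (pvPivot xs)).length_eq
        simp only [List.length_append] at hp3
        omega
      have heqall : ∀ b ∈ xs.filter (fun x => decide (x = pvPivot xs)), b = pvPivot xs := by
        intro b hb
        simpa using (List.mem_filter.mp hb).2
      have hpmem : pvPivot xs ∈ xs.filter (fun x => decide (x = pvPivot xs)) :=
        List.mem_filter.mpr ⟨pvPivot_mem xs hnil, by simp⟩
      have heqpos : 1 ≤ (xs.filter (fun x => decide (x = pvPivot xs))).length :=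
        List.length_pos_of_mem hpmem
      have hdec := pvSortedDecomp xs (pvPivot xs)
      rw [sumSmallest, if_neg hge, dif_neg hnil]
      by_cases hcase1 : m ≤ ((pvLess xs (pvPivot xs)).length : Int)
      · rw [if_pos hcase1]
        have hlolen : (pvLess xs (pvPivot xs)).length ≤ N := by
          have := pvLess_length_lt xs hnil
          omega
        rw [ih _ m hlolen h0 hcase1, hdec, List.append_assoc]
        have h1 : m.toNat ≤ (PySem.List.sorted (pvLess xs (pvPivot xs)) (fun x => x) false).length := by
          rw [PySem.List.length_sorted]; omega
        rw [List.take_append_of_le_length h1]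
      · rw [if_neg hcase1]
        have hlolt : ((pvLess xs (pvPivot xs)).length : Int) < m := lt_of_not_ge hcase1
        by_cases hcase2 : m ≤ (xs.length : Int) - ((pvGreater xs (pvPivot xs)).length : Int)
        · rw [if_pos hcase2]
          rw [hdec, List.append_assoc, pvTakeAppend]
          have hAfull : (PySem.List.sorted (pvLess xs (pvPivot xs)) (fun x => x) false).length ≤ m.toNat := by
            rw [PySem.List.length_sorted]; omega
          rw [List.take_of_length_le hAfull, pvTakeAppend]
          have hCzero : m.toNat - (PySem.List.sorted (pvLess xs (pvPivot xs)) (fun x => x) false).length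
              - (xs.filter (fun x => decide (x = pvPivot xs))).length = 0 := by
            rw [PySem.List.length_sorted]; omega
          rw [hCzero, List.take_zero, List.append_nil, List.sum_append]
          have hEsum : ((xs.filter (fun x => decide (x = pvPivot xs))).take
                (m.toNat - (PySem.List.sorted (pvLess xs (pvPivot xs)) (fun x => x) false).length)).sum
              = (m - ((pvLess xs (pvPivot xs)).length : Int)) * pvPivot xs := by
            rw [pvConstSum (pvPivot xs) _ (fun b hb => heqall b (List.mem_of_mem_take hb))]
            congr 1
            rw [List.length_take, PySem.List.length_sorted]
            omega
          rw [hEsum, (PySem.List.sorted_perm _ _ _).sum_eq]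
          ring
        · rw [if_neg hcase2]
          have hneqlt : (xs.length : Int) - ((pvGreater xs (pvPivot xs)).length : Int) < m :=
            lt_of_not_ge hcase2
          have hhilen : (pvGreater xs (pvPivot xs)).length ≤ N := by
            have := pvGreater_length_lt xs hnil
            omega
          have h0' : 0 ≤ m - ((xs.length : Int) - ((pvGreater xs (pvPivot xs)).length : Int)) := by
            omega
          have hle' : m - ((xs.length : Int) - ((pvGreater xs (pvPivot xs)).length : Int))
              ≤ ((pvGreater xs (pvPivot xs)).length : Int) := by omega
          rw [ih _ _ hhilen h0' hle', hdec, List.append_assoc,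
            pvTakeAppend, pvTakeAppend]
          have hAfull : (PySem.List.sorted (pvLess xs (pvPivot xs)) (fun x => x) false).length ≤ m.toNat := by
            rw [PySem.List.length_sorted]; omega
          have hEfull : (xs.filter (fun x => decide (x = pvPivot xs))).length
              ≤ m.toNat - (PySem.List.sorted (pvLess xs (pvPivot xs)) (fun x => x) false).length := by
            rw [PySem.List.length_sorted]; omega
          rw [List.take_of_length_le hAfull, List.take_of_length_le hEfull]
          have hr : m.toNat - (PySem.List.sorted (pvLess xs (pvPivot xs)) (fun x => x) false).length
              - (xs.filter (fun x => decide (x = pvPivot xs))).length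
              = (m - ((xs.length : Int) - ((pvGreater xs (pvPivot xs)).length : Int))).toNat := by
            rw [PySem.List.length_sorted]; omega
          rw [hr, List.sum_append, List.sum_append]
          have hxsum : xs.sum = (pvLess xs (pvPivot xs)).sum
              + (xs.filter (fun x => decide (x = pvPivot xs))).sum
              + (pvGreater xs (pvPivot xs)).sum := by
            have := (pvPartition3 xs (pvPivot xs)).sum_eq
            simp only [List.sum_append] at this
            omega
          rw [(PySem.List.sorted_perm (pvLess xs (pvPivot xs)) _ _).sum_eq]
          omega

-- A's second loop sums a prefix of the (sorted) costs
theorem pvLoop_eq : ∀ (l : List Int) (res cnt n : Int), cnt < n → n - cnt ≤ (l.length : Int) →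
    minSoldiersLoop l res cnt n = res + (l.take (n - cnt).toNat).sum := by
  intro l
  induction l with
  | nil => intro res cnt n h1 h2; simp at h2; omega
  | cons j t ih =>
    intro res cnt n h1 h2
    rw [minSoldiersLoop]
    by_cases h : cnt + 1 ≥ n
    · rw [if_pos h]
      have h3 : (n - cnt).toNat = 1 := by omega
      rw [h3]
      simp
    · rw [if_neg h]
      rw [ih (res + j) (cnt + 1) n (by omega) (by simp at h2 ⊢; omega)]
      have h3 : (n - cnt).toNat = (n - (cnt + 1)).toNat + 1 := by omega
      rw [h3, List.take_succ_cons, List.sum_cons]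
      ring

-- ===== VERDICT (by name: the statement is the Claim_ definition above) =====
theorem minSoldiers_spec : Claim_equal_minSoldiers := by
  intro arr k _hdom _hpre
  unfold Spec_minSoldiers minSoldiers minSoldiers_alt
  simp only [pvFoldA k arr ([], 0), List.nil_append, Int.zero_add]
  have hnb : ((-(PySem.Int.floordiv (-(arr.length : Int)) 2)) - 1) * 2 < (arr.length : Int)
      ∧ (arr.length : Int) ≤ (-(PySem.Int.floordiv (-(arr.length : Int)) 2)) * 2 :=
    (PySem.Int.neg_floordiv_neg_eq_iff_of_pos (by norm_num)).mp rfl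
  have hpart : (arr.filter (fun i => PySem.Int.mod i k == 0)).length
      + ((arr.filter (fun i => !(PySem.Int.mod i k == 0))).map (fun i => k - PySem.Int.mod i k)).length
      = arr.length := by
    have hfp := (List.filter_append_perm (fun i => PySem.Int.mod i k == 0) arr).length_eq
    simp only [List.length_append] at hfp
    simp only [List.length_map]
    omega
  by_cases hc : ((arr.filter (fun i => PySem.Int.mod i k == 0)).length : Int)
      ≥ -(PySem.Int.floordiv (-(arr.length : Int)) 2)
  · rw [if_pos hc, if_pos (by omega)]
  · rw [if_neg hc, if_neg (by omega)]
    have hlt : ((arr.filter (fun i => PySem.Int.mod i k == 0)).length : Int)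
        < -(PySem.Int.floordiv (-(arr.length : Int)) 2) := lt_of_not_ge hc
    have hlen : -(PySem.Int.floordiv (-(arr.length : Int)) 2)
        - ((arr.filter (fun i => PySem.Int.mod i k == 0)).length : Int)
        ≤ (((arr.filter (fun i => !(PySem.Int.mod i k == 0))).map (fun i => k - PySem.Int.mod i k)).length : Int) := by
      omega
    rw [pvLoop_eq _ 0 _ _ hlt (by rw [PySem.List.length_sorted]; omega),
      pvSumSmallest_eq _ _ _ (le_refl _) (by omega) hlen]
    simp
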